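-- pv_equiv track=rewrite | github.com/AntoineB33/video_player | generate_sortings.py | generate_unique_strings
-- ===== SOURCE A (Python) =====
-- import itertools
-- import string
--
-- def generate_unique_strings(n):
--     charset = string.ascii_lowercase  # you can expand this (e.g. add digits or uppercase)
--     result = []
--     length = 1
--
--     while len(result) < n:
--         for combo in itertools.product(charset, repeat=length):
--             result.append(''.join(combo))
--             if len(result) == n:
--                 return result
--         length += 1
-- ===== SOURCE B (Python) =====
-- def generate_unique_strings(n):
--     # Each output is the bijective base-26 numeral of its 1-based index.
--     result = []
--     k = 1
--     while len(result) < n: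
--         s = ''
--         q = k
--         while q > 0:
--             q, r = divmod(q - 1, 26)
--             s = chr(ord('a') + r) + s
--         result.append(s)
--         k += 1
--     return result
-- ===== Notes on version B (the rewrite author's own statement) =====
-- stated objective: alternative
-- what changed: Replaces the nested itertools.product length-batch enumeration with direct per-index arithmetic: each output string is computed independently as the bijective base-26 numeral of its 1-based index via repeated divmod.
-- outside the precondition, e.g. on generate_unique_strings(0): A returns None, B returns []
import Mathlib
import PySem

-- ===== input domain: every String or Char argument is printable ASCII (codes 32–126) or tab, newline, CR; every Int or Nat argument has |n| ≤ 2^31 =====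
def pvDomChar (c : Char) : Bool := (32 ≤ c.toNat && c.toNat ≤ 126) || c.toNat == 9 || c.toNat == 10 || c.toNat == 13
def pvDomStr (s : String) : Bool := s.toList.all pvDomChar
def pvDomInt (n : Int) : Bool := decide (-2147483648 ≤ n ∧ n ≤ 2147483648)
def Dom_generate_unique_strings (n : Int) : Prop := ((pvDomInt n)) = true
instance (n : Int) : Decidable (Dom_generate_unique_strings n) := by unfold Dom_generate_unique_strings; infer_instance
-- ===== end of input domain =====

-- B computes each output independently as the bijective base-26 numeral of its 1-based
-- index (repeated divmod), instead of A's itertools.product length-batch enumeration.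

-- ===== PORT A =====
-- string.ascii_lowercase
def pvCharset : List Char :=
  ['a','b','c','d','e','f','g','h','i','j','k','l','m',
   'n','o','p','q','r','s','t','u','v','w','x','y','z']

-- itertools.product(charset, repeat=length): rightmost position varies fastest
def pvProducts : Nat → List (List Char)
  | 0 => [[]]
  | l+1 => pvCharset.flatMap (fun c => (pvProducts l).map (fun w => c :: w))

-- the inner `for combo in …` loop with its early `return` (Sum.inl = returned)
def pvInner (n : Int) (res : List String) : List (List Char) → (List String) ⊕ (List String)
  | [] => Sum.inr res
  | c :: rest =>
    let res' := res ++ [String.mk c]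
    if (res'.length : Int) = n then Sum.inl res' else pvInner n res' rest

-- the outer `while len(result) < n` loop; fuel is only a totality guard (n.toNat + 1
-- always suffices, proved below); when the while-condition fails Python returns None
-- (no list value) — those inputs (n ≤ 0) are excluded by Pre_ below.
def pvOuter : Nat → Int → List String → Nat → List String
  | 0, _, res, _ => res
  | fuel+1, n, res, l =>
    if (res.length : Int) < n then
      match pvInner n res (pvProducts l) with
      | Sum.inl r => r
      | Sum.inr r => pvOuter fuel n r (l+1)
    else res

def generate_unique_strings (n : Int) : List String := pvOuter (n.toNat + 1) n [] 1

-- ===== PORT B =====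
-- inner `while q > 0: q, r = divmod(q - 1, 26); s = chr(ord('a') + r) + s`
def pvNum : Nat → List Char → List Char
  | 0, s => s
  | q+1, s => pvNum (q / 26) (Char.ofNat (97 + q % 26) :: s)
  decreasing_by exact Nat.lt_succ_of_le (Nat.div_le_self q 26)

-- the `while len(result) < n` loop of B; fuel is only a totality guard
def pvAltLoop : Nat → Int → Nat → List String → List String
  | 0, _, _, res => res
  | fuel+1, n, k, res =>
    if (res.length : Int) < n then pvAltLoop fuel n (k+1) (res ++ [String.mk (pvNum k [])])
    else res

def generate_unique_strings_alt (n : Int) : List String := pvAltLoop (n.toNat + 1) n 1 []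

-- ===== PRECONDITION & SPEC =====
-- Pre_ excludes non-positive n, where A's while-loop never runs and A returns None (not a
-- list value); B returns an empty list there.
def Pre_generate_unique_strings (n : Int) : Prop := 1 ≤ n
instance (n : Int) : Decidable (Pre_generate_unique_strings n) := by
  unfold Pre_generate_unique_strings; infer_instance

def pvWitness_generate_unique_strings : Int := (30)

def Spec_generate_unique_strings (n : Int) (out : List String) : Prop := out = generate_unique_strings_alt n
instance (n : Int) (out : List String) : Decidable (Spec_generate_unique_strings n out) := by unfold Spec_generate_unique_strings; infer_instance

-- ===== CLAIM (what is proved, stated in full; the proofs are below) =====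
def Claim_equal_generate_unique_strings : Prop := ∀ (n : Int), Dom_generate_unique_strings n → Pre_generate_unique_strings n → Spec_generate_unique_strings n (generate_unique_strings n)

-- ===== LEMMAS AND PROOFS =====

-- first 1-based index of the words of a given length (0 for length 0, then 1, 27, 703, ...)
def pvStart : Nat → Nat
  | 0 => 0
  | l+1 => 26 * pvStart l + 1

def pvWord (k : Nat) : String := String.mk (pvNum k [])

def pvPrefix (N : Nat) : List String := (List.range N).map (fun i => pvWord (i+1))

theorem pvStart_add_pow : ∀ l, pvStart l + 26 ^ l = pvStart (l+1) := by
  intro l; induction l with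
  | zero => simp [pvStart]
  | succ l ih => simp only [pvStart, pow_succ] at *; omega

theorem pvStart_pos (l : Nat) : 1 ≤ pvStart (l+1) := by
  simp only [pvStart]; omega

theorem pvProducts_length : ∀ l, (pvProducts l).length = 26 ^ l := by
  intro l; induction l with
  | zero => rfl
  | succ l ih =>
    simp [pvProducts, List.length_flatMap, ih, List.map_const', List.sum_replicate,
          smul_eq_mul, pow_succ]
    norm_num [pvCharset, mul_comm]

-- itertools.product can be peeled at the last position as well as at the first
theorem pvProducts_snoc : ∀ l, pvProducts (l+1)
    = (pvProducts l).flatMap (fun w => pvCharset.map (fun c => w ++ [c])) := by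
  intro l; induction l with
  | zero => decide
  | succ l ih =>
    show pvCharset.flatMap (fun c => (pvProducts (l+1)).map (fun w => c :: w)) = _
    conv_lhs => rw [ih]
    conv_rhs => rw [show pvProducts (l+1) = pvCharset.flatMap (fun c => (pvProducts l).map (fun w => c :: w)) from rfl]
    simp [List.map_flatMap, List.flatMap_assoc, List.flatMap_map, List.map_map, Function.comp_def,
          List.cons_append]

theorem pvSnoc_length (xs : List (List Char)) :
    (xs.flatMap (fun w => pvCharset.map (fun c => w ++ [c]))).length = 26 * xs.length := by
  simp [List.length_flatMap, List.map_const', List.sum_replicate, smul_eq_mul, pvCharset]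
  ring

theorem pvCharset_get : ∀ (r : Nat) (h : r < 26),
    pvCharset[r]'(by have h26 : pvCharset.length = 26 := rfl; omega) = Char.ofNat (97 + r) := by
  decide

theorem pvSnoc_getElem : ∀ (xs : List (List Char)) (j : Nat) (h : j < 26 * xs.length),
    (xs.flatMap (fun w => pvCharset.map (fun c => w ++ [c])))[j]'(by rw [pvSnoc_length]; exact h)
      = xs[j / 26]'(by omega) ++ [pvCharset[j % 26]'(by have h26 : pvCharset.length = 26 := rfl; omega)] := by
  intro xs
  induction xs with
  | nil => intro j h; simp at h
  | cons x xs ih =>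
    intro j h
    simp only [List.flatMap_cons]
    by_cases hj : j < 26
    · rw [List.getElem_append_left (by simpa [pvCharset] using hj)]
      have h0 : j / 26 = 0 := Nat.div_eq_of_lt hj
      have hm : j % 26 = j := Nat.mod_eq_of_lt hj
      simp [h0, hm]
    · rw [List.getElem_append_right (by simp [pvCharset]; omega)]
      have hlen : (pvCharset.map (fun c => x ++ [c])).length = 26 := by simp [pvCharset]
      have h' : j - 26 < 26 * xs.length := by simp at h; omega
      simp only [hlen]
      rw [ih (j - 26) h']
      have hpos : 1 ≤ j / 26 := by omega
      obtain ⟨m, hm2⟩ : ∃ m, j / 26 = m + 1 := ⟨j / 26 - 1, by omega⟩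
      have e1 : (x :: xs)[j / 26]'(by simp; omega) = xs[m]'(by simp at h; omega) := by
        simp only [getElem_congr_idx hm2, List.getElem_cons_succ]
      rw [e1, getElem_congr_idx (show (j - 26) / 26 = m from by omega),
          getElem_congr_idx (show (j - 26) % 26 = j % 26 from by omega)]

theorem pvNum_spec : ∀ l (j : Nat) (h : j < 26 ^ l) (s : List Char),
    pvNum (pvStart l + j) s = (pvProducts l)[j]'(by rw [pvProducts_length]; exact h) ++ s := by
  intro l
  induction l with
  | zero =>
    intro j h s
    have : j = 0 := by simpa using h
    subst this
    simp [pvStart, pvNum, pvProducts]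
  | succ l ih =>
    intro j h s
    have hp : (26:Nat) ^ (l+1) = 26 ^ l * 26 := pow_succ 26 l
    have key : pvStart (l+1) + j = (26 * pvStart l + j) + 1 := by simp [pvStart]; omega
    rw [key, pvNum]
    have hdiv : (26 * pvStart l + j) / 26 = pvStart l + j / 26 := by omega
    have hmod : (26 * pvStart l + j) % 26 = j % 26 := by omega
    rw [hdiv, hmod]
    have hj : j / 26 < 26 ^ l := by rw [hp] at h; omega
    rw [ih (j / 26) hj]
    have hsn := pvSnoc_getElem (pvProducts l) j (by rw [pvProducts_length]; omega)
    rw [List.getElem_of_eq (pvProducts_snoc l) (by rw [pvProducts_length]; exact h), hsn,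
        pvCharset_get (j % 26) (by omega)]
    simp

theorem pvProducts_map_word : ∀ l, (pvProducts l).map String.mk
    = (List.range (26 ^ l)).map (fun j => pvWord (pvStart l + j)) := by
  intro l
  apply List.ext_getElem
  · simp [pvProducts_length]
  · intro i h1 h2
    have hi : i < 26 ^ l := by simpa [pvProducts_length] using h1
    simp only [List.getElem_map, List.getElem_range]
    rw [pvWord, pvNum_spec l i hi []]
    simp

theorem pvPrefix_length (N : Nat) : (pvPrefix N).length = N := by
  simp [pvPrefix]

theorem pvPrefix_add (a b : Nat) :
    pvPrefix (a + b) = pvPrefix a ++ (List.range b).map (fun j => pvWord (a + j + 1)) := by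
  simp [pvPrefix, List.range_add, List.map_map, Function.comp]

theorem pvInner_spec : ∀ (N : Nat) (combos : List (List Char)) (res : List String),
    res.length < N →
    pvInner (N : Int) res combos
      = if res.length + combos.length < N then Sum.inr (res ++ combos.map String.mk)
        else Sum.inl (res ++ (combos.take (N - res.length)).map String.mk) := by
  intro N combos
  induction combos with
  | nil =>
    intro res h
    rw [pvInner, if_pos (by simp; omega)]
    simp
  | cons c rest ih =>
    intro res h
    rw [pvInner]
    by_cases he : res.length + 1 = N
    · rw [if_pos (by simp; omega)]
      rw [if_neg (by simp; omega), show N - res.length = 1 from by omega]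
      simp
    · rw [if_neg (by simp; omega)]
      rw [ih (res ++ [String.mk c]) (by simp; omega)]
      by_cases hc : res.length + (rest.length + 1) < N
      · rw [if_pos (by simp; omega), if_pos (by simp; omega)]
        simp
      · rw [if_neg (by simp; omega), if_neg (by simp; omega)]
        rw [show N - res.length = (N - (res.length + 1)) + 1 from by omega]
        simp [List.take_succ_cons]

theorem pvPrefix_succ (m : Nat) : pvPrefix (m+1) = pvPrefix m ++ [pvWord (m+1)] := by
  simp [pvPrefix, List.range_succ]

theorem pvAlt_spec : ∀ (N fuel m : Nat), m ≤ N → N - m < fuel →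
    pvAltLoop fuel (N : Int) (m+1) (pvPrefix m) = pvPrefix N := by
  intro N fuel
  induction fuel with
  | zero => intro m _ h; omega
  | succ fuel ih =>
    intro m hm hf
    rw [pvAltLoop]
    by_cases h : m < N
    · rw [if_pos (by simp [pvPrefix_length]; exact_mod_cast h)]
      rw [show pvPrefix m ++ [String.mk (pvNum (m+1) [])] = pvPrefix (m+1) from
        (pvPrefix_succ m).symm]
      exact ih (m+1) (by omega) (by omega)
    · have : m = N := by omega
      subst this
      rw [if_neg (by simp [pvPrefix_length])]

theorem pvPrefix_seg (a b : Nat) (ha : 1 ≤ a) :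
    pvPrefix (a - 1) ++ (List.range b).map (fun j => pvWord (a + j)) = pvPrefix (a - 1 + b) := by
  rw [pvPrefix_add (a-1) b]
  congr 1
  apply List.map_congr_left
  intro j _
  congr 1
  omega

theorem pvOuter_spec : ∀ (N fuel l : Nat), pvStart (l+1) - 1 < N →
    N - pvStart (l+1) < fuel →
    pvOuter fuel (N : Int) (pvPrefix (pvStart (l+1) - 1)) (l+1) = pvPrefix N := by
  intro N fuel
  induction fuel with
  | zero => intro l _ h; omega
  | succ fuel ih =>
    intro l hlt hf
    have hS1 : 1 ≤ pvStart (l+1) := pvStart_pos l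
    have hpow : pvStart (l+1) + 26 ^ (l+1) = pvStart (l+1+1) := pvStart_add_pow (l+1)
    have hS2 : 1 ≤ pvStart (l+1+1) := pvStart_pos (l+1)
    have hppos : 1 ≤ 26 ^ (l+1) := Nat.one_le_pow _ _ (by omega)
    rw [pvOuter]
    rw [if_pos (by simp [pvPrefix_length]; exact_mod_cast hlt)]
    rw [pvInner_spec N (pvProducts (l+1)) _ (by rw [pvPrefix_length]; exact hlt)]
    rw [pvPrefix_length, pvProducts_length]
    by_cases hc : pvStart (l+1) - 1 + 26 ^ (l+1) < N
    · rw [if_pos hc]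
      rw [pvProducts_map_word (l+1), pvPrefix_seg (pvStart (l+1)) (26 ^ (l+1)) hS1]
      rw [show pvStart (l+1) - 1 + 26 ^ (l+1) = pvStart (l+1+1) - 1 from by omega]
      have e1 : pvStart (l+1+1) - 1 < N := by omega
      have e2 : N - pvStart (l+1+1) < fuel := by omega
      exact ih (l+1) e1 e2
    · rw [if_neg hc]
      show pvPrefix (pvStart (l+1) - 1)
          ++ ((pvProducts (l+1)).take (N - (pvStart (l+1) - 1))).map String.mk = pvPrefix N
      rw [List.map_take, pvProducts_map_word (l+1), ← List.map_take, List.take_range]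
      rw [Nat.min_eq_left (by omega)]
      rw [pvPrefix_seg (pvStart (l+1)) _ hS1]
      congr 1
      have hx : pvStart (l+1) ≤ N := by omega
      omega

-- ===== VERDICT (by name: the statement is the Claim_ definition above) =====
theorem generate_unique_strings_spec : Claim_equal_generate_unique_strings := by
  intro n _ hpre
  unfold Spec_generate_unique_strings
  have hn1 : (1:Int) ≤ n := hpre
  have hn : ((n.toNat : Nat) : Int) = n := Int.toNat_of_nonneg (by omega)
  have hN1 : 1 ≤ n.toNat := by omega
  unfold generate_unique_strings generate_unique_strings_alt
  rw [← hn]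
  have hs1 : pvStart (0+1) = 1 := rfl
  have hA : pvOuter (n.toNat + 1) ((n.toNat : Nat) : Int) (pvPrefix (pvStart 1 - 1)) 1
      = pvPrefix n.toNat := pvOuter_spec n.toNat (n.toNat + 1) 0 (by omega) (by omega)
  have hB : pvAltLoop (n.toNat + 1) ((n.toNat : Nat) : Int) (0+1) (pvPrefix 0)
      = pvPrefix n.toNat := pvAlt_spec n.toNat (n.toNat + 1) 0 (by omega) (by omega)
  simpa [pvPrefix, hn] using hA.trans hB.symm
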